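-- pv_equiv track=rewrite | github.com/ruth987/Competitve-programming-A2SV | 1332-remove-palindromic-subsequences/1332-remove-palindromic-subsequences.py | removePalindromeSub
-- ===== SOURCE A (Python) =====
-- def removePalindromeSub(s):
--    if s == s[::-1]:
--        return 1
--    first = s[0]
--    for letter in s:
--        if letter != first:
--            return 2
--    return 1
-- ===== SOURCE B (Python) =====
-- def removePalindromeSub(s):
--     i, j = 0, len(s) - 1
--     while i < j:
--         if s[i] != s[j]:
--             return 2
--         i += 1
--         j -= 1
--     return 1
-- ===== Notes on version B (the rewrite author's own statement) =====
-- stated objective: simpler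
-- what changed: Replaces the reversed-copy comparison plus a redundant all-same-character scan with a single two-pointer loop that returns 2 on the first mismatch and 1 if none.
import Mathlib
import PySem

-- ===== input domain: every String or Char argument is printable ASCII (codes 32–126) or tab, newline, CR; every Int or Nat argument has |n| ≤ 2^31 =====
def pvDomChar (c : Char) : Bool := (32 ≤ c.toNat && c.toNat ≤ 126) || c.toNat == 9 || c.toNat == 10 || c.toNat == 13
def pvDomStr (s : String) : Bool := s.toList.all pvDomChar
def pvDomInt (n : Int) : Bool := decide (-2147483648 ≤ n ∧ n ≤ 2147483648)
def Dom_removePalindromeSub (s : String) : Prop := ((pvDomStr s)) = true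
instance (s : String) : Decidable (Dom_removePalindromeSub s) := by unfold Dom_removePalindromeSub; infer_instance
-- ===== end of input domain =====

-- B replaces A's reversed-copy comparison and redundant all-same-character scan with one two-pointer loop (simpler).


-- ===== PORT A =====
-- 'for letter in s: if letter != first: return 2' ; afterwards 'return 1'
def aScan (first : Char) : List Char → Int
  | [] => 1
  | c :: rest => if c ≠ first then 2 else aScan first rest

def removePalindromeSub (s : String) : Int :=
  let l := s.toList
  if l = l.reverse then 1
  else
    match PySem.List.pyGet? l 0 with
    | none => 1  -- unreachable: an empty string is a palindrome, so s[0] is always in range here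
    | some first => aScan first l

-- ===== PORT B =====
def bLoop (l : List Char) (i j : Nat) : Int :=
  if i < j then
    if PySem.List.pyGet? l (i : Int) ≠ PySem.List.pyGet? l (j : Int) then 2
    else bLoop l (i + 1) (j - 1)
  else 1
termination_by j - i
decreasing_by omega

def removePalindromeSub_alt (s : String) : Int :=
  bLoop s.toList 0 (s.toList.length - 1)

-- ===== PRECONDITION & SPEC =====
def Spec_removePalindromeSub (s : String) (out : Int) : Prop := out = removePalindromeSub_alt s
instance (s : String) (out : Int) : Decidable (Spec_removePalindromeSub s out) := by unfold Spec_removePalindromeSub; infer_instance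

-- ===== CLAIM (what is proved, stated in full; the proofs are below) =====
def Claim_equal_removePalindromeSub : Prop := ∀ (s : String), Dom_removePalindromeSub s → Spec_removePalindromeSub s (removePalindromeSub s)

-- ===== LEMMAS AND PROOFS =====

-- A's scan returns 1 exactly when every character equals `first`
theorem aScan_eq (first : Char) (t : List Char) :
    aScan first t = if ∀ c ∈ t, c = first then 1 else 2 := by
  induction t with
  | nil => simp [aScan]
  | cons c rest ih =>
    by_cases h : c = first
    · simp [aScan, h, ih]
    · simp [aScan, h]

-- two-pointer loop characterisation
theorem bLoop_eq (l : List Char) (i j : Nat) :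
    bLoop l i j =
      if ∀ k, i ≤ k → k < j → l[k]? = l[i + j - k]? then 1 else 2 := by
  induction i, j using bLoop.induct l with
  | case1 i j hij hne =>
    rw [bLoop, if_pos hij, if_pos hne]
    have hcond : ¬ (∀ k, i ≤ k → k < j → l[k]? = l[i + j - k]?) := by
      intro h
      have hi := h i le_rfl hij
      have hij' : i + j - i = j := by omega
      rw [hij'] at hi
      exact hne (by simpa [PySem.List.pyGet?_natCast] using hi)
    rw [if_neg hcond]
  | case2 i j hij hne ih =>
    have hEq : PySem.List.pyGet? l (i : Int) = PySem.List.pyGet? l (j : Int) := by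
      by_contra h; exact hne h
    have hEq' : l[i]? = l[j]? := by simpa [PySem.List.pyGet?_natCast] using hEq
    rw [bLoop, if_pos hij, if_neg hne, ih]
    congr 1
    have hiff : (∀ k, i + 1 ≤ k → k < j - 1 → l[k]? = l[i + 1 + (j - 1) - k]?) ↔
           (∀ k, i ≤ k → k < j → l[k]? = l[i + j - k]?) := by
      constructor
      · intro h k hk1 hk2
        rcases Nat.eq_or_lt_of_le hk1 with hk | hk
        · have e : i + j - k = j := by omega
          rw [e, ← hk]; exact hEq'
        · by_cases hk3 : k < j - 1
          · have := h k hk hk3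
            have e : i + 1 + (j - 1) - k = i + j - k := by omega
            rwa [e] at this
          · have hkj : k = j - 1 := by omega
            by_cases hm : i + 1 < j - 1
            · have := h (i + 1) le_rfl hm
              have e1 : i + 1 + (j - 1) - (i + 1) = j - 1 := by omega
              rw [e1] at this
              have e2 : i + j - k = i + 1 := by omega
              rw [e2, hkj]; exact this.symm
            · -- k is the midpoint: i + 1 = j - 1 = k
              have e : i + j - k = k := by omega
              rw [e]
      · intro h k hk1 hk2
        have := h k (by omega) (by omega)
        have e : i + 1 + (j - 1) - k = i + j - k := by omega
        rw [e]; exact this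
    simp only [hiff]
  | case3 i j hij =>
    rw [bLoop, if_neg hij]
    have hc : ∀ k, i ≤ k → k < j → l[k]? = l[i + j - k]? := by
      intro k h1 h2; omega
    rw [if_pos hc]

-- the two-pointer condition over the whole list is exactly palindromicity
theorem pair_cond_iff (l : List Char) :
    (∀ k, 0 ≤ k → k < l.length - 1 → l[k]? = l[0 + (l.length - 1) - k]?) ↔ l = l.reverse := by
  rw [List.ext_getElem?_iff]
  constructor
  · intro h n
    by_cases hn : n < l.length
    · rw [List.getElem?_reverse hn]
      by_cases hlast : n < l.length - 1
      · have := h n (Nat.zero_le _) hlast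
        have e : 0 + (l.length - 1) - n = l.length - 1 - n := by omega
        rwa [e] at this
      · have hne : n = l.length - 1 := by omega
        by_cases h0 : l.length - 1 = 0
        · have e : l.length - 1 - n = n := by omega
          rw [e]
        · have := h 0 le_rfl (by omega)
          have e : 0 + (l.length - 1) - 0 = l.length - 1 := by omega
          rw [e] at this
          have e2 : l.length - 1 - n = 0 := by omega
          rw [e2, hne]; exact this.symm
    · rw [List.getElem?_eq_none (by omega), List.getElem?_eq_none (by simp; omega)]
  · intro h k _ hk
    have := h k
    rw [List.getElem?_reverse (by omega)] at this
    have e : 0 + (l.length - 1) - k = l.length - 1 - k := by omega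
    rw [e]; exact this

theorem alt_eq (s : String) :
    removePalindromeSub_alt s = if s.toList = s.toList.reverse then 1 else 2 := by
  rw [removePalindromeSub_alt, bLoop_eq]
  congr 1
  simp only [eq_iff_iff, Nat.zero_add]
  have := pair_cond_iff s.toList
  simpa using this

-- ===== VERDICT (by name: the statement is the Claim_ definition above) =====
theorem removePalindromeSub_spec : Claim_equal_removePalindromeSub := by
  intro s _
  unfold Spec_removePalindromeSub
  rw [alt_eq]
  simp only [removePalindromeSub]
  by_cases hp : s.toList = s.toList.reverse
  · rw [if_pos hp, if_pos hp]
  · rw [if_neg hp, if_neg hp]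
    have hne : s.toList ≠ [] := by
      intro h; exact hp (by rw [h]; rfl)
    obtain ⟨first, rest, hcons⟩ := List.exists_cons_of_ne_nil hne
    have hget : PySem.List.pyGet? s.toList 0 = some first := by
      rw [hcons]; simp [PySem.List.pyGet?, PySem.List.pyIdx?]
    rw [hget]
    show aScan first s.toList = 2
    rw [aScan_eq]
    have hnotall : ¬ ∀ c ∈ s.toList, c = first := by
      intro hall
      apply hp
      have hrep : s.toList = List.replicate s.toList.length first := by
        apply List.eq_replicate_iff.mpr
        exact ⟨rfl, hall⟩
      rw [hrep, List.reverse_replicate]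
    rw [if_neg hnotall]
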